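-- pv_equiv track=rewrite | github.com/AlaBoussoffara/Time-Series-Text-to-Insight | utils/bootstrap_postgres.py | _unique_headers
-- ===== SOURCE A (Python) =====
-- from typing import Dict, Iterable, List, Optional, Sequence, Tuple
--
-- def _unique_headers(headers: Sequence[str]) -> List[str]:
--     seen: Dict[str, int] = {}
--     unique: List[str] = []
--     for header in headers:
--         header = header.strip()
--         count = seen.get(header, 0)
--         if count == 0:
--             unique.append(header)
--         else:
--             unique.append(f"{header}_{count + 1}")
--         seen[header] = count + 1
--     return unique
-- ===== SOURCE B (Python) =====
-- def _unique_headers(headers):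
--     stripped = [h.strip() for h in headers]
--     positions = {}
--     for idx, s in enumerate(stripped):
--         positions.setdefault(s, []).append(idx)
--     out = [""] * len(stripped)
--     for s, idxs in positions.items():
--         for i, idx in enumerate(idxs):
--             out[idx] = s if i == 0 else f"{s}_{i + 1}"
--     return out
-- ===== Notes on version B (the rewrite author's own statement) =====
-- stated objective: alternative
-- what changed: Replaces A's single pass with a running seen-count dict by a two-pass scheme: first build a grouping table mapping each stripped header to its list of positions, then scatter the bare value / suffixed value into a preallocated output by position and rank.
import Mathlib
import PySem

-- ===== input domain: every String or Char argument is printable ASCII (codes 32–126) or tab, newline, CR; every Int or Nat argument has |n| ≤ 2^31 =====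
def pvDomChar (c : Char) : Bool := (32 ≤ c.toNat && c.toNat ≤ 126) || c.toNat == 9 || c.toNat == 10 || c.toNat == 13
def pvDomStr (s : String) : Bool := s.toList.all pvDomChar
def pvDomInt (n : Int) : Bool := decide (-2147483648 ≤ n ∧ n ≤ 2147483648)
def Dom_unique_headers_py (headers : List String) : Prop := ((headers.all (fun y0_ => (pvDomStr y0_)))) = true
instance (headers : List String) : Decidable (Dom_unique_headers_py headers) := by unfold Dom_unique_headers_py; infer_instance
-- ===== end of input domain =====

-- B replaces A's single running seen-count pass by a two-pass scheme: a position-grouping table, then a rank/position scatter.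

-- ===== PORT A =====
-- loop body of A: state is (seen dict, unique list)
def uhStep (st : PySem.Dict String Int × List String) (header : String) :
    PySem.Dict String Int × List String :=
  let h := PySem.Str.strip header
  let count := st.1.getD h 0
  let unique := if count = 0 then st.2 ++ [h]
                else st.2 ++ [h ++ "_" ++ PySem.Int.toStr (count + 1)]
  (st.1.insert h (count + 1), unique)

def unique_headers_py (headers : List String) : List String :=
  (headers.foldl uhStep (PySem.Dict.empty, [])).2

-- ===== PORT B =====
def unique_headers_py_alt (headers : List String) : List String :=
  let stripped := headers.map PySem.Str.strip
  let positions := (PySem.List.enumerate stripped).foldl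
      (fun (d : PySem.Dict String (List Int)) p => d.modify p.2 [] (fun l => l ++ [p.1]))
      PySem.Dict.empty
  let out := List.replicate stripped.length ""
  positions.items.foldl
    (fun out g =>
      (PySem.List.enumerate g.2).foldl
        (fun out q =>
          PySem.List.pySetD out q.2
            (if q.1 = 0 then g.1 else g.1 ++ "_" ++ PySem.Int.toStr (q.1 + 1)))
        out)
    out

-- ===== PRECONDITION & SPEC =====
def Spec_unique_headers_py (headers : List String) (out : List String) : Prop := out = unique_headers_py_alt headers
instance (headers : List String) (out : List String) : Decidable (Spec_unique_headers_py headers out) := by unfold Spec_unique_headers_py; infer_instance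

-- ===== CLAIM (what is proved, stated in full; the proofs are below) =====
def Claim_equal_unique_headers_py : Prop := ∀ (headers : List String), Dom_unique_headers_py headers → Spec_unique_headers_py headers (unique_headers_py headers)

-- ===== LEMMAS AND PROOFS =====

-- the scatter value written for rank i of a group s (B's inner expression)
def uhVal (s : String) (i : Int) : String :=
  if i = 0 then s else s ++ "_" ++ PySem.Int.toStr (i + 1)

-- the same value with a Nat occurrence count (the form A's emission takes)
def uhValN (s : String) (c : Nat) : String :=
  if c = 0 then s else s ++ "_" ++ PySem.Int.toStr ((c : Int) + 1)

theorem uhVal_natCast (s : String) (c : Nat) : uhVal s (c : Int) = uhValN s c := by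
  unfold uhVal uhValN
  by_cases h : c = 0 <;> simp [h]

-- reference emission over the STRIPPED list: pre = stripped prefix already emitted
def uhGo (pre : List String) : List String → List String
  | [] => []
  | s :: t => uhValN s (pre.count s) :: uhGo (pre ++ [s]) t

-- positions of s among t (indices offset by the enumerate start k)
def uhIdx (s : String) (t : List String) (k : Int) : List Int :=
  ((PySem.List.enumerate t k).filter (fun p => p.2 == s)).map (·.1)

theorem uhGo_len (t pre : List String) : (uhGo pre t).length = t.length := by
  induction t generalizing pre with
  | nil => simp [uhGo]
  | cons x t' ih => simp [uhGo, ih]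

theorem uhGo_getD (t : List String) : ∀ (pre : List String) (j : Nat), j < t.length →
    (uhGo pre t).getD j "" = uhValN (t.getD j "") ((pre ++ t.take j).count (t.getD j "")) := by
  induction t with
  | nil => intro pre j h; simp at h
  | cons x t' ih =>
    intro pre j h
    cases j with
    | zero => simp [uhGo]
    | succ j' =>
      have := ih (pre ++ [x]) j' (by simpa using h)
      simpa [uhGo, List.append_assoc] using this

theorem uhGo_A : ∀ (rest : List String) (seen : PySem.Dict String Int)
    (acc pre : List String),
    (∀ s, seen.getD s 0 = (pre.count s : Int)) →
    (rest.foldl uhStep (seen, acc)).2 = acc ++ uhGo pre (rest.map PySem.Str.strip) := by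
  intro rest
  induction rest with
  | nil => intro seen acc pre _; simp [uhGo]
  | cons h t ih =>
    intro seen acc pre hinv
    have hc : seen.getD (PySem.Str.strip h) 0 = ((pre.count (PySem.Str.strip h) : Int)) :=
      hinv _
    have hinv' : ∀ s,
        (seen.insert (PySem.Str.strip h) (seen.getD (PySem.Str.strip h) 0 + 1)).getD s 0
          = (((pre ++ [PySem.Str.strip h]).count s : Int)) := by
      intro s
      rw [PySem.Dict.getD_insert]
      by_cases hs : s = PySem.Str.strip h
      · subst hs
        simp [hc, List.count_append]
      · simp [hs, hinv s, List.count_append,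
          Ne.symm hs]
    have := ih (seen.insert (PySem.Str.strip h) (seen.getD (PySem.Str.strip h) 0 + 1))
      (acc ++ [if seen.getD (PySem.Str.strip h) 0 = 0 then PySem.Str.strip h
               else PySem.Str.strip h ++ "_" ++
                 PySem.Int.toStr (seen.getD (PySem.Str.strip h) 0 + 1)])
      (pre ++ [PySem.Str.strip h]) hinv'
    simp only [List.foldl_cons, List.map_cons, uhGo]
    have hstep : uhStep (seen, acc) h =
        (seen.insert (PySem.Str.strip h) (seen.getD (PySem.Str.strip h) 0 + 1),
         acc ++ [if seen.getD (PySem.Str.strip h) 0 = 0 then PySem.Str.strip h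
                 else PySem.Str.strip h ++ "_" ++
                   PySem.Int.toStr (seen.getD (PySem.Str.strip h) 0 + 1)]) := by
      simp [uhStep]
      split <;> rfl
    rw [hstep]
    rw [this, hc]
    by_cases h0 : pre.count (PySem.Str.strip h) = 0
    · simp [h0, uhValN, List.append_assoc]
    · simp [h0, uhValN, List.append_assoc]

-- membership in the position list of s
theorem uhIdx_mem (s : String) : ∀ (t : List String) (k j : Int),
    j ∈ uhIdx s t k ↔ (k ≤ j ∧ j < k + t.length ∧ t.getD (j - k).toNat "" = s) := by
  intro t
  induction t with
  | nil =>
    intro k j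
    simp only [uhIdx, PySem.List.enumerate_nil, List.filter_nil, List.map_nil,
      List.not_mem_nil, List.length_nil, Nat.cast_zero, add_zero, false_iff]
    rintro ⟨h1, h2, _⟩; omega
  | cons x t' ih =>
    intro k j
    simp only [uhIdx] at ih ⊢
    rw [PySem.List.enumerate_cons]
    have he : k + 1 ≤ j → (j - k).toNat = (j - (k + 1)).toNat + 1 := by omega
    by_cases hx : x = s
    · rw [List.filter_cons, if_pos (by simpa using hx), List.map_cons, List.mem_cons,
        ih (k + 1) j]
      constructor
      · rintro (rfl | ⟨h1, h2, h3⟩)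
        · refine ⟨le_refl _, by simp only [List.length_cons]; push_cast; omega, by simp [hx]⟩
        · refine ⟨by omega, by simp only [List.length_cons] at *; push_cast at h2 ⊢; omega, ?_⟩
          rw [he h1]; simpa using h3
      · rintro ⟨h1, h2, h3⟩
        by_cases hj : j = k
        · exact Or.inl hj
        · refine Or.inr ⟨by omega, by simp only [List.length_cons] at h2; push_cast at h2 ⊢; omega, ?_⟩
          rw [he (by omega)] at h3; simpa using h3
    · rw [List.filter_cons, if_neg (by simpa using hx), ih (k + 1) j]
      constructor
      · rintro ⟨h1, h2, h3⟩
        refine ⟨by omega, by simp only [List.length_cons] at *; push_cast at h2 ⊢; omega, ?_⟩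
        rw [he h1]; simpa using h3
      · rintro ⟨h1, h2, h3⟩
        by_cases hj : j = k
        · subst hj; simp at h3; exact absurd h3 hx
        · refine ⟨by omega, by simp only [List.length_cons] at h2; push_cast at h2 ⊢; omega, ?_⟩
          rw [he (by omega)] at h3; simpa using h3

-- rank of a position in its group = occurrences of s strictly before it
theorem uhIdx_idxOf (s : String) : ∀ (t : List String) (k j : Int),
    k ≤ j → j < k + t.length → t.getD (j - k).toNat "" = s →
    (uhIdx s t k).idxOf j = (t.take (j - k).toNat).count s := by
  intro t
  induction t with
  | nil => intro k j h1 h2 _; simp at h2; omega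
  | cons x t' ih =>
    intro k j h1 h2 h3
    simp only [uhIdx] at ih ⊢
    rw [PySem.List.enumerate_cons]
    have he : k + 1 ≤ j → (j - k).toNat = (j - (k + 1)).toNat + 1 := by omega
    by_cases hx : x = s
    · rw [List.filter_cons, if_pos (by simpa using hx), List.map_cons]
      by_cases hj : j = k
      · subst hj
        simp [List.idxOf_cons_self]
      · have hk1 : k + 1 ≤ j := by omega
        rw [he hk1] at h3 ⊢
        rw [List.take_succ_cons, List.count_cons]
        rw [List.idxOf_cons_ne _ (Ne.symm hj)]
        rw [ih (k + 1) j hk1 (by simp only [List.length_cons] at h2; push_cast at h2 ⊢; omega) (by simpa using h3)]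
        simp [hx]
    · rw [List.filter_cons, if_neg (by simpa using hx)]
      by_cases hj : j = k
      · subst hj; simp at h3; exact absurd h3 hx
      · have hk1 : k + 1 ≤ j := by omega
        rw [he hk1] at h3 ⊢
        rw [List.take_succ_cons, List.count_cons]
        rw [ih (k + 1) j hk1 (by simp only [List.length_cons] at h2; push_cast at h2 ⊢; omega) (by simpa using h3)]
        simp [hx]

theorem uhIdx_pairwise (s : String) (t : List String) (k : Int) :
    (uhIdx s t k).Pairwise (· < ·) := by
  have h1 : ((PySem.List.enumerate t k).map (·.1)).Pairwise (· < ·) := by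
    rw [PySem.List.map_fst_enumerate]
    exact PySem.List.pairwise_lt_pyRange_one _ _
  have hsub : List.Sublist (uhIdx s t k) ((PySem.List.enumerate t k).map (·.1)) :=
    List.Sublist.map _ List.filter_sublist
  exact h1.sublist hsub

theorem uhIdx_nodup_toNat (s : String) (t : List String) :
    ((uhIdx s t 0).map Int.toNat).Nodup := by
  have hp := uhIdx_pairwise s t 0
  have hnd : (uhIdx s t 0).Nodup := hp.imp (fun h => ne_of_lt h)
  refine hnd.map_on ?_
  intro x hx y hy hxy
  have h1 := ((uhIdx_mem s t 0 x).mp hx).1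
  have h2 := ((uhIdx_mem s t 0 y).mp hy).1
  omega

-- one group's scatter preserves the length
theorem inner_len (s : String) : ∀ (l : List Int) (k : Int) (o : List String),
    ((PySem.List.enumerate l k).foldl
      (fun o q => PySem.List.pySetD o q.2 (uhVal s q.1)) o).length = o.length := by
  intro l
  induction l with
  | nil => intro k o; simp [PySem.List.enumerate_nil]
  | cons x l' ih =>
    intro k o
    rw [PySem.List.enumerate_cons, List.foldl_cons, ih]
    exact PySem.List.length_pySetD _ _ _

-- one group's scatter: cells of the group are overwritten by rank, others untouched
theorem inner_getD (s : String) : ∀ (l : List Int) (k : Int) (o : List String),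
    (∀ x ∈ l, 0 ≤ x ∧ x.toNat < o.length) → ((l.map Int.toNat)).Nodup →
    ∀ (j : Nat),
    ((PySem.List.enumerate l k).foldl
      (fun o q => PySem.List.pySetD o q.2 (uhVal s q.1)) o).getD j ""
      = if (j : Int) ∈ l then uhVal s (k + l.idxOf (j : Int)) else o.getD j "" := by
  intro l
  induction l with
  | nil => intro k o _ _ j; simp [PySem.List.enumerate_nil]
  | cons x l' ih =>
    intro k o hb hnd j
    obtain ⟨hx0, hxlt⟩ := hb x (List.mem_cons_self ..)
    rw [PySem.List.enumerate_cons, List.foldl_cons]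
    have hset : PySem.List.pySetD o x (uhVal s k) = o.set x.toNat (uhVal s k) :=
      PySem.List.pySetD_of_nonneg o (uhVal s k) hx0
    simp only [List.map_cons, List.nodup_cons] at hnd
    have hrec := ih (k + 1) (o.set x.toNat (uhVal s k))
      (by intro y hy
          have := hb y (List.mem_cons_of_mem _ hy)
          simpa using this) hnd.2 j
    rw [hset, hrec]
    by_cases hmem : (j : Int) ∈ l'
    · have hjx : (j : Int) ≠ x := by
        intro h
        exact hnd.1 (by
          have : x.toNat = j := by omega
          rw [this]
          exact List.mem_map_of_mem hmem)
      simp only [if_pos hmem, if_pos (List.mem_cons.mpr (Or.inr hmem))]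
      rw [List.idxOf_cons_ne _ (Ne.symm hjx)]
      congr 1
      push_cast
      ring
    · by_cases hjx : j = x.toNat
      · have hjxi : (j : Int) = x := by omega
        rw [if_neg hmem, if_pos (List.mem_cons.mpr (Or.inl hjxi)), hjxi,
          List.idxOf_cons_self]
        subst hjx
        simp [List.getD, hxlt]
      · have hjxi : (j : Int) ≠ x := by omega
        rw [if_neg hmem, if_neg (by simp [hjxi, hmem])]
        simp [List.getD, Ne.symm hjx]

-- scatter over a list of groups, each group the position list of its key
theorem outer_getD (stripped : List String) : ∀ (keys : List String) (o : List String),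
    o.length = stripped.length →
    (((keys.map (fun s => (s, uhIdx s stripped 0))).foldl
        (fun out g =>
          (PySem.List.enumerate g.2).foldl
            (fun out q =>
              PySem.List.pySetD out q.2
                (if q.1 = 0 then g.1 else g.1 ++ "_" ++ PySem.Int.toStr (q.1 + 1)))
            out)
        o).length = stripped.length) ∧
    (∀ (j : Nat),
      ((keys.map (fun s => (s, uhIdx s stripped 0))).foldl
        (fun out g =>
          (PySem.List.enumerate g.2).foldl
            (fun out q =>
              PySem.List.pySetD out q.2
                (if q.1 = 0 then g.1 else g.1 ++ "_" ++ PySem.Int.toStr (q.1 + 1)))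
            out)
        o).getD j ""
      = if j < stripped.length ∧ stripped.getD j "" ∈ keys then
          uhValN (stripped.getD j "") ((stripped.take j).count (stripped.getD j ""))
        else o.getD j "") := by
  intro keys
  induction keys with
  | nil => intro o ho; simp [ho]
  | cons s keys' ih =>
    intro o ho
    simp only [List.map_cons, List.foldl_cons]
    have hval : (fun (out : List String) (q : Int × Int) =>
        PySem.List.pySetD out q.2
          (if q.1 = 0 then s else s ++ "_" ++ PySem.Int.toStr (q.1 + 1)))
        = fun out q => PySem.List.pySetD out q.2 (uhVal s q.1) := by
      funext out q; simp [uhVal]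
    have hb : ∀ x ∈ uhIdx s stripped 0, 0 ≤ x ∧ x.toNat < o.length := by
      intro x hx
      have := (uhIdx_mem s stripped 0 x).mp hx
      constructor
      · exact this.1
      · omega
    have hlen' : ((PySem.List.enumerate (uhIdx s stripped 0) 0).foldl
        (fun out q => PySem.List.pySetD out q.2 (uhVal s q.1)) o).length = stripped.length := by
      rw [inner_len]; exact ho
    have hinner := inner_getD s (uhIdx s stripped 0) 0 o hb (uhIdx_nodup_toNat s stripped)
    obtain ⟨ihlen, ihgetD⟩ := ih _ hlen'
    constructor
    · rw [hval]; exact ihlen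
    · intro j
      rw [hval, ihgetD j]
      by_cases h1 : j < stripped.length ∧ stripped.getD j "" ∈ keys'
      · rw [if_pos h1, if_pos ⟨h1.1, List.mem_cons_of_mem _ h1.2⟩]
      · rw [if_neg h1, hinner j]
        by_cases h2 : j < stripped.length ∧ stripped.getD j "" = s
        · have hmem : (j : Int) ∈ uhIdx s stripped 0 := by
            rw [uhIdx_mem]
            refine ⟨by positivity, by omega, by simpa using h2.2⟩
          rw [if_pos hmem, if_pos ⟨h2.1, by rw [h2.2]; exact List.mem_cons_self ..⟩]
          rw [uhIdx_idxOf s stripped 0 j (by positivity) (by omega) (by simpa using h2.2)]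
          simp only [zero_add, sub_zero, Int.toNat_natCast]
          rw [uhVal_natCast, h2.2]
        · have hmem : (j : Int) ∉ uhIdx s stripped 0 := by
            rw [uhIdx_mem]
            rintro ⟨_, hlt, hg⟩
            exact h2 ⟨by omega, by simpa using hg⟩
          rw [if_neg hmem, if_neg (by
            rintro ⟨hj, hm⟩
            rcases List.mem_cons.mp hm with h | h
            · exact h2 ⟨hj, h⟩
            · exact h1 ⟨hj, h⟩)]

-- the grouping dict's items are exactly the distinct stripped values with their position lists
theorem positions_items (stripped : List String) :
    ((PySem.List.enumerate stripped).foldl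
      (fun (d : PySem.Dict String (List Int)) p => d.modify p.2 [] (fun l => l ++ [p.1]))
      PySem.Dict.empty).items
    = (PySem.Set.ofList stripped).map (fun s => (s, uhIdx s stripped 0)) := by
  set d := (PySem.List.enumerate stripped).foldl
      (fun (d : PySem.Dict String (List Int)) p => d.modify p.2 [] (fun l => l ++ [p.1]))
      PySem.Dict.empty with hd
  have hkeys : d.keys = PySem.Set.ofList stripped := by
    rw [hd, PySem.Dict.keys_foldl_modify_key]
    rw [PySem.List.map_snd_enumerate]
    exact PySem.Set.update_nil_left _
  have hnd : d.keys.Nodup := by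
    rw [hd]
    exact PySem.Dict.nodup_keys_foldl_modify_key _ _ _ _ _ (by simp)
  have hgetD : ∀ s, d.getD s [] = uhIdx s stripped 0 := by
    intro s
    rw [hd]
    have hswap : (PySem.List.enumerate stripped).foldl
        (fun (d : PySem.Dict String (List Int)) p => d.modify p.2 [] (fun l => l ++ [p.1]))
        PySem.Dict.empty
      = ((PySem.List.enumerate stripped).map Prod.swap).foldl
        (fun (d : PySem.Dict String (List Int)) p => d.modify p.1 [] (fun l => l ++ [p.2]))
        PySem.Dict.empty := by
      rw [List.foldl_map]; rfl
    rw [hswap, PySem.Dict.getD_foldl_modify_append]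
    simp only [PySem.Dict.getD_empty]
    simp [uhIdx, List.filter_map, List.map_map, Function.comp_def]
  rw [PySem.Dict.items_eq_map_keys d hnd []]
  rw [hkeys]
  exact List.map_congr_left (fun s _ => by rw [hgetD s])

theorem getD_eq_getElem' (l : List String) (j : Nat) (h : j < l.length) :
    l.getD j "" = l[j] := by
  simp [List.getD, List.getElem?_eq_getElem h]

theorem alt_eq_uhGo (headers : List String) :
    unique_headers_py_alt headers = uhGo [] (headers.map PySem.Str.strip) := by
  unfold unique_headers_py_alt
  simp only []
  rw [positions_items]
  obtain ⟨hlen, hgetD⟩ := outer_getD (headers.map PySem.Str.strip)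
    (PySem.Set.ofList (headers.map PySem.Str.strip))
    (List.replicate (headers.map PySem.Str.strip).length "") (by simp)
  apply List.ext_getElem
  · rw [hlen, uhGo_len]
  · intro j h1 h2
    rw [← getD_eq_getElem' _ j h1, ← getD_eq_getElem' _ j h2]
    have hj : j < (headers.map PySem.Str.strip).length := by
      rw [← hlen]; exact h1
    have hmem : (headers.map PySem.Str.strip).getD j "" ∈
        PySem.Set.ofList (headers.map PySem.Str.strip) := by
      rw [PySem.Set.mem_ofList, getD_eq_getElem' _ j hj]
      exact List.getElem_mem _
    rw [hgetD j, uhGo_getD _ [] j hj, if_pos ⟨hj, hmem⟩]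
    simp

-- ===== VERDICT (by name: the statement is the Claim_ definition above) =====
theorem unique_headers_py_spec : Claim_equal_unique_headers_py := by
  intro headers _
  unfold Spec_unique_headers_py unique_headers_py
  rw [alt_eq_uhGo]
  have := uhGo_A headers PySem.Dict.empty [] [] (by intro s; simp)
  simpa using this
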